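-- pv_equiv track=rewrite | github.com/CamilaBodack/fcc-scientific-computing-with-python | time_calculator/time_calculator.py | next_day_of_week
-- ===== SOURCE A (Python) =====
-- def names_week_day():
--     return {
--         0: "Sunday",
--         1: "Monday",
--         2: "Tuesday",
--         3: "Wednesday",
--         4: "Thursday",
--         5: "Friday",
--         6: "saturDay",
--     }
--
-- def next_day_of_week(day: str, checker: int):
--     days = names_week_day()
--     iter_days = iter(days.items())
--     if checker == 0 or checker == 1:
--         for name in iter_days:
--             if name[1].casefold() == day.casefold():
--                 if name[0] == 6:
--                     return "Sunday"
--                 next_item = next(iter_days)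
--                 return next_item[1]
-- ===== SOURCE B (Python) =====
-- def next_day_of_week(day: str, checker: int):
--     if checker not in (0, 1):
--         return None
--     names = ["Sunday", "Monday", "Tuesday", "Wednesday", "Thursday", "Friday", "saturDay"]
--     successor = dict(zip([n.casefold() for n in names], names[1:] + names[:1]))
--     return successor.get(day.casefold())
-- ===== Notes on version B (the rewrite author's own statement) =====
-- stated objective: idiomatic
-- what changed: Instead of scanning the day table with a shared iterator and peeking the next item (special-casing key 6), B builds a casefolded-name-to-successor dictionary once by zipping the name list with its rotation (names[1:]+names[:1]) and answers with a single dict .get lookup, so both the wraparound and the None-on-no-match fall out of the data structure.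
import Mathlib
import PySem

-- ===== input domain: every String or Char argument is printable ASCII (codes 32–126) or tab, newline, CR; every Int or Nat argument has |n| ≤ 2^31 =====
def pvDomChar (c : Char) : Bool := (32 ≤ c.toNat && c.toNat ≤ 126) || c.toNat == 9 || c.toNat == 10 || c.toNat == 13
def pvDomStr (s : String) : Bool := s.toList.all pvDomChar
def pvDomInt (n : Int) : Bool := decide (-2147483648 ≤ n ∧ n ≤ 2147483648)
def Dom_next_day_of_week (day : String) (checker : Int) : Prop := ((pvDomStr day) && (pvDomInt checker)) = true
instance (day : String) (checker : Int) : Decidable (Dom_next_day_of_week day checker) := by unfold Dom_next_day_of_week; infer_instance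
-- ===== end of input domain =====

-- B: builds a casefolded-name → successor dictionary once (zip with the rotated name list) and answers
-- with a single dict lookup, instead of A's shared-iterator peek with a special case for key 6; idiomatic, not faster.
-- ===== PORT A =====
-- names_week_day(): dict literal, keys 0..6 in insertion order
def nwdItems : List (Int × String) :=
  [(0, "Sunday"), (1, "Monday"), (2, "Tuesday"), (3, "Wednesday"), (4, "Thursday"), (5, "Friday"), (6, "saturDay")]

-- the for-loop over the shared iterator; casefold = lower, exact on the ASCII domain
def nwdLoop (day : String) : List (Int × String) → Option String
  | [] => none
  | (k, name) :: rest =>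
    if PySem.Chars.lower name.toList = PySem.Chars.lower day.toList then
      if k = 6 then some "Sunday"
      else (rest.head?).map (·.2)   -- next(iter_days); none = StopIteration (unreachable: k ≠ 6 ⇒ rest ≠ [])
    else nwdLoop day rest

def next_day_of_week (day : String) (checker : Int) : Option String :=
  if checker = 0 ∨ checker = 1 then nwdLoop day nwdItems else none

-- ===== PORT B =====
def nwdNames : List String :=
  ["Sunday", "Monday", "Tuesday", "Wednesday", "Thursday", "Friday", "saturDay"]

-- successor = dict(zip([n.casefold() for n in names], names[1:] + names[:1]))
def nwdSucc : PySem.Dict (List Char) String :=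
  ((nwdNames.map (fun n => PySem.Chars.lower n.toList)).zip (nwdNames.drop 1 ++ nwdNames.take 1)).foldl
    (fun (d : PySem.Dict (List Char) String) kv => d.insert kv.1 kv.2) PySem.Dict.empty

-- return successor.get(day.casefold())
def next_day_of_week_alt (day : String) (checker : Int) : Option String :=
  if checker ≠ 0 ∧ checker ≠ 1 then none
  else nwdSucc.get? (PySem.Chars.lower day.toList)

-- ===== PRECONDITION & SPEC =====
def Spec_next_day_of_week (day : String) (checker : Int) (out : Option String) : Prop := out = next_day_of_week_alt day checker
instance (day : String) (checker : Int) (out : Option String) : Decidable (Spec_next_day_of_week day checker out) := by unfold Spec_next_day_of_week; infer_instance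

-- ===== CLAIM =====
def Claim_equal_next_day_of_week : Prop := ∀ (day : String) (checker : Int), Dom_next_day_of_week day checker → Spec_next_day_of_week day checker (next_day_of_week day checker)

-- ===== LEMMAS AND PROOFS =====
-- the built successor dictionary, evaluated to its literal items
theorem nwdSucc_eq : nwdSucc = PySem.Dict.mk
    [(['s','u','n','d','a','y'], "Monday"), (['m','o','n','d','a','y'], "Tuesday"),
     (['t','u','e','s','d','a','y'], "Wednesday"), (['w','e','d','n','e','s','d','a','y'], "Thursday"),
     (['t','h','u','r','s','d','a','y'], "Friday"), (['f','r','i','d','a','y'], "saturDay"),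
     (['s','a','t','u','r','d','a','y'], "Sunday")] := by decide

-- lower of the seven literal names, evaluated
theorem lower_Sunday : PySem.Chars.lower ['S','u','n','d','a','y'] = ['s','u','n','d','a','y'] := by decide
theorem lower_Monday : PySem.Chars.lower ['M','o','n','d','a','y'] = ['m','o','n','d','a','y'] := by decide
theorem lower_Tuesday : PySem.Chars.lower ['T','u','e','s','d','a','y'] = ['t','u','e','s','d','a','y'] := by decide
theorem lower_Wednesday : PySem.Chars.lower ['W','e','d','n','e','s','d','a','y'] = ['w','e','d','n','e','s','d','a','y'] := by decide
theorem lower_Thursday : PySem.Chars.lower ['T','h','u','r','s','d','a','y'] = ['t','h','u','r','s','d','a','y'] := by decide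
theorem lower_Friday : PySem.Chars.lower ['F','r','i','d','a','y'] = ['f','r','i','d','a','y'] := by decide
theorem lower_saturDay : PySem.Chars.lower ['s','a','t','u','r','D','a','y'] = ['s','a','t','u','r','d','a','y'] := by decide

theorem get?_mk_nil {ν : Type} (x : List Char) : (PySem.Dict.mk ([] : List (List Char × ν))).get? x = none := by
  simp [PySem.Dict.get?]

-- ===== VERDICT =====
theorem next_day_of_week_spec : Claim_equal_next_day_of_week := by
  intro day checker _
  unfold Spec_next_day_of_week next_day_of_week next_day_of_week_alt
  by_cases h0 : checker = 0 <;> by_cases h1 : checker = 1 <;>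
    simp [h0, h1, nwdLoop, nwdItems, nwdSucc_eq, PySem.Dict.get?_mk_cons, beq_iff_eq, get?_mk_nil,
      lower_Sunday, lower_Monday, lower_Tuesday, lower_Wednesday, lower_Thursday, lower_Friday, lower_saturDay]
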